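-- pv_equiv track=rewrite | github.com/desmondkao/Excel_Enhancer | app.py | get_processing_order_optimized
-- ===== SOURCE A (Python) =====
-- from typing import Dict, Any, List, Optional, Tuple
--
-- def get_processing_order_optimized(target_columns: List[str]) -> List[str]:
--     """Return columns in optimal processing order: country -> state -> city -> others."""
--     # Start with country (most general, easiest to determine)
--     priority_order = ['country', 'state', 'province', 'region', 'city']
--     ordered_columns = []
--     remaining_columns = []
--
--     # Add geographic columns in order of decreasing generality
--     for priority in priority_order:
--         for col in target_columns:
--             if priority in col.lower() and col not in ordered_columns:
--                 ordered_columns.append(col)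
--
--     # Add non-geographic columns
--     for col in target_columns:
--         if col not in ordered_columns:
--             remaining_columns.append(col)
--
--     return ordered_columns + remaining_columns
-- ===== SOURCE B (Python) =====
-- def get_processing_order_optimized(target_columns):
--     """Return columns in optimal processing order: country -> state -> city -> others."""
--     priority_order = ['country', 'state', 'province', 'region', 'city']
--     n = len(priority_order)
--     buckets = [[] for _ in range(n)]
--     others = []
--     seen = set()
--     for col in target_columns:
--         low = col.lower()
--         rank = n
--         for i, kw in enumerate(priority_order):
--             if kw in low:
--                 rank = i
--                 break
--         if rank == n:
--             others.append(col)
--         elif col not in seen: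
--             seen.add(col)
--             buckets[rank].append(col)
--     result = []
--     for bucket in buckets:
--         result.extend(bucket)
--     result.extend(others)
--     return result
-- ===== Notes on version B (the rewrite author's own statement) =====
-- stated objective: alternative
-- what changed: Single pass over the columns computing each column's priority rank once and appending into per-rank buckets (with a seen-set deduplicating geographic columns), instead of rescanning the whole column list once per priority keyword with list-membership dedup.
import Mathlib
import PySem

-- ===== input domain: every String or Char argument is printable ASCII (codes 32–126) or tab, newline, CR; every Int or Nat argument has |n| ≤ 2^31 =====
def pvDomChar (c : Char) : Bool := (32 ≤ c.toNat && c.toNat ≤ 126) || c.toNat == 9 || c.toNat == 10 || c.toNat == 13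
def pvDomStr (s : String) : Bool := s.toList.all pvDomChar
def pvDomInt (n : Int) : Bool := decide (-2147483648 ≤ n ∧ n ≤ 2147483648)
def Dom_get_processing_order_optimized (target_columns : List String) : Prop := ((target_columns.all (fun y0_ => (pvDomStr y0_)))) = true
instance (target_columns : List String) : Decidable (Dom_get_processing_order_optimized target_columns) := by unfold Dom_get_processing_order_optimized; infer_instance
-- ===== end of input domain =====

-- B replaces A's per-keyword rescans of the column list (with list-membership dedup) by one
-- pass that ranks each column once into per-priority buckets (objective: alternative decomposition).

-- ===== PORT A =====
-- A's priority_order literal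
def pvPriorityOrder : List String := ["country", "state", "province", "region", "city"]

def get_processing_order_optimized (target_columns : List String) : List String :=
  let ordered_columns : List String :=
    pvPriorityOrder.foldl (fun ordered priority =>
      target_columns.foldl (fun ordered col =>
        if PySem.Str.isIn priority (PySem.Str.lower col) = true ∧ col ∉ ordered
        then ordered ++ [col] else ordered) ordered) []
  let remaining_columns : List String :=
    target_columns.foldl (fun rem col =>
      if col ∉ ordered_columns then rem ++ [col] else rem) []
  ordered_columns ++ remaining_columns

-- ===== PORT B =====
-- Source B's inner 'for i, kw in enumerate(priority_order): if kw in low: rank = i; break'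
def pvRankGo : List String → Nat → String → Nat
  | [], i, _ => i
  | kw :: rest, i, low => if PySem.Str.isIn kw low = true then i else pvRankGo rest (i + 1) low

def get_processing_order_optimized_alt (target_columns : List String) : List String :=
  let priority_order : List String := ["country", "state", "province", "region", "city"]
  let n := priority_order.length
  let st :=
    target_columns.foldl
      (fun (st : List (List String) × PySem.Set String × List String) col =>
        let (buckets, seen, others) := st
        let low := PySem.Str.lower col
        let rank := pvRankGo priority_order 0 low
        if rank = n then (buckets, seen, others ++ [col])
        else if PySem.Set.contains seen col = true then (buckets, seen, others)
        else (buckets.modify rank (fun b => b ++ [col]), PySem.Set.add seen col, others))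
      (List.replicate n [], PySem.Set.empty, [])
  let result := st.1.foldl (fun r bucket => r ++ bucket) []
  result ++ st.2.2

-- ===== PRECONDITION & SPEC =====
def Spec_get_processing_order_optimized (target_columns : List String) (out : List String) : Prop := out = get_processing_order_optimized_alt target_columns
instance (target_columns : List String) (out : List String) : Decidable (Spec_get_processing_order_optimized target_columns out) := by unfold Spec_get_processing_order_optimized; infer_instance

-- ===== CLAIM (what is proved, stated in full; the proofs are below) =====
def Claim_equal_get_processing_order_optimized : Prop := ∀ (target_columns : List String), Dom_get_processing_order_optimized target_columns → Spec_get_processing_order_optimized target_columns (get_processing_order_optimized target_columns)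

-- ===== LEMMAS AND PROOFS =====

-- rank of a column: index of the first matching priority keyword, 5 if none
def pvRank (col : String) : Nat := pvRankGo pvPriorityOrder 0 (PySem.Str.lower col)

theorem pvRank_le (c : String) : pvRank c ≤ 5 := by
  simp only [pvRank, pvPriorityOrder, pvRankGo]
  split_ifs <;> omega

theorem pvRank_match (c : String) (j : Nat) (hj : j < 5) (h : pvRank c = j) :
    PySem.Str.isIn (pvPriorityOrder.getD j "") (PySem.Str.lower c) = true := by
  revert h
  simp only [pvRank, pvPriorityOrder, pvRankGo]
  split_ifs with h0 h1 h2 h3 h4 <;> intro h <;>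
    (try omega) <;> subst h <;> simp_all

theorem pvRank_le_of_match (c : String) (j : Nat) (hj : j < 5)
    (h : PySem.Str.isIn (pvPriorityOrder.getD j "") (PySem.Str.lower c) = true) :
    pvRank c ≤ j := by
  simp only [pvRank, pvPriorityOrder, pvRankGo]
  split_ifs with h0 h1 h2 h3 h4 <;> (try omega) <;>
    interval_cases j <;> simp_all [pvPriorityOrder]

-- A's inner loop over target_columns at keyword j is Set.update with the rank-j columns,
-- provided every column of smaller rank is already in the accumulator.
theorem innerA_eq (j : Nat) (hj : j < 5) :
    ∀ (l acc : List String), (∀ c ∈ l, pvRank c < j → c ∈ acc) →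
    l.foldl (fun ordered col =>
        if PySem.Str.isIn (pvPriorityOrder.getD j "") (PySem.Str.lower col) = true ∧ col ∉ ordered
        then ordered ++ [col] else ordered) acc
      = PySem.Set.update acc (l.filter (fun c => pvRank c = j)) := by
  intro l
  induction l with
  | nil => intro acc _; simp [PySem.Set.update]
  | cons c rest ih =>
    intro acc hlt
    by_cases hm : PySem.Str.isIn (pvPriorityOrder.getD j "") (PySem.Str.lower c) = true
    · have hle : pvRank c ≤ j := pvRank_le_of_match c j hj hm
      by_cases hr : pvRank c = j
      · by_cases hin : c ∈ acc
        · simp only [List.foldl_cons, hm, hin, not_true_eq_false, and_false, if_false,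
            List.filter_cons, hr]
          rw [ih acc (fun x hx h => hlt x (List.mem_cons_of_mem _ hx) h)]
          simp only [decide_true, if_true]
          show PySem.Set.update acc _ = PySem.Set.update acc _
          simp only [PySem.Set.update, List.foldl_cons, PySem.Set.add,
            (PySem.Set.contains_iff acc c).2 hin, if_true]
        · simp only [List.foldl_cons, hm, hin, not_false_eq_true, and_true, if_true,
            List.filter_cons, hr, decide_true]
          rw [ih (acc ++ [c]) (fun x hx h => List.mem_append_left _ (hlt x (List.mem_cons_of_mem _ hx) h))]
          simp only [PySem.Set.update, List.foldl_cons, PySem.Set.add]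
          rw [if_neg (by simpa [PySem.Set.contains_iff] using hin)]
      · have hcin : c ∈ acc := hlt c (List.mem_cons_self ..) (by omega)
        simp only [List.foldl_cons, hm, hcin, not_true_eq_false, and_false, if_false,
          List.filter_cons, hr, decide_false, if_false]
        exact ih acc (fun x hx h => hlt x (List.mem_cons_of_mem _ hx) h)
    · have hr : pvRank c ≠ j := fun h => hm (pvRank_match c j hj h)
      simp only [List.foldl_cons, hm, List.filter_cons, hr, decide_false]
      exact ih acc (fun x hx h => hlt x (List.mem_cons_of_mem _ hx) h)

-- the ordered list after processing keywords 0..j-1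
def pvOrdered (target : List String) : Nat → List String
  | 0 => []
  | j + 1 => pvOrdered target j ++ PySem.Set.ofList (target.filter (fun c => pvRank c = j))

theorem pvOrdered_mem (target : List String) :
    ∀ (j : Nat), ∀ c, c ∈ pvOrdered target j ↔ c ∈ target ∧ pvRank c < j := by
  intro j
  induction j with
  | zero => simp [pvOrdered]
  | succ j ih =>
    intro c
    simp only [pvOrdered, List.mem_append, ih, PySem.Set.mem_ofList, List.mem_filter,
      decide_eq_true_eq]
    constructor
    · rintro (⟨h1, h2⟩ | ⟨h1, h2⟩) <;> exact ⟨h1, by omega⟩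
    · rintro ⟨h1, h2⟩
      by_cases h : pvRank c = j
      · exact Or.inr ⟨h1, h⟩
      · exact Or.inl ⟨h1, by omega⟩

theorem pvOrdered_step (target : List String) (j : Nat) (hj : j < 5) :
    target.foldl (fun ordered col =>
        if PySem.Str.isIn (pvPriorityOrder.getD j "") (PySem.Str.lower col) = true ∧ col ∉ ordered
        then ordered ++ [col] else ordered) (pvOrdered target j)
      = pvOrdered target (j + 1) := by
  rw [innerA_eq j hj target (pvOrdered target j)
        (fun c hc h => (pvOrdered_mem target j c).2 ⟨hc, h⟩)]
  rw [PySem.Set.update_eq_append_filter]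
  show pvOrdered target j ++ _ = pvOrdered target j ++ _
  congr 1
  rw [List.filter_eq_self.2]
  intro c hc
  have hcmem := (PySem.Set.mem_ofList _ c).1 hc
  simp only [List.mem_filter, decide_eq_true_eq] at hcmem
  simp only [Bool.not_eq_eq_eq_not, Bool.not_true, ← Bool.not_eq_true,
    PySem.Set.contains_iff, pvOrdered_mem target j c]
  omega

-- A's result, characterized
theorem portA_eq (target : List String) :
    get_processing_order_optimized target
      = pvOrdered target 5 ++ target.filter (fun c => pvRank c = 5) := by
  show (pvPriorityOrder.foldl _ []) ++ _ = _
  have hord : pvPriorityOrder.foldl (fun ordered priority =>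
      target.foldl (fun ordered col =>
        if PySem.Str.isIn priority (PySem.Str.lower col) = true ∧ col ∉ ordered
        then ordered ++ [col] else ordered) ordered) [] = pvOrdered target 5 := by
    show List.foldl _ _ (_ :: _ :: _ :: _ :: _ :: []) = _
    simp only [List.foldl_cons, List.foldl_nil]
    have e0 := pvOrdered_step target 0 (by omega)
    have e1 := pvOrdered_step target 1 (by omega)
    have e2 := pvOrdered_step target 2 (by omega)
    have e3 := pvOrdered_step target 3 (by omega)
    have e4 := pvOrdered_step target 4 (by omega)
    simp only [show pvPriorityOrder.getD 0 "" = "country" from rfl,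
      show pvPriorityOrder.getD 1 "" = "state" from rfl,
      show pvPriorityOrder.getD 2 "" = "province" from rfl,
      show pvPriorityOrder.getD 3 "" = "region" from rfl,
      show pvPriorityOrder.getD 4 "" = "city" from rfl] at e0 e1 e2 e3 e4
    simp only [Nat.reduceAdd] at e0 e1 e2 e3 e4
    simp only [show pvOrdered target 0 = [] from rfl] at e0
    rw [e0, e1, e2, e3, e4]
  rw [hord]
  congr 1
  rw [PySem.List.foldl_congr_mem (g := fun rem col => if pvRank col = 5 then rem ++ [col] else rem)]
  · exact PySem.List.foldl_append_ite_eq_filter _ _ _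
  · intro acc x hx
    have h5 := pvRank_le x
    by_cases h : x ∈ pvOrdered target 5
    · have := (pvOrdered_mem target 5 x).1 h
      rw [if_neg (by simp [h]), if_neg (by omega)]
    · have : ¬ pvRank x < 5 := fun hlt => h ((pvOrdered_mem target 5 x).2 ⟨hx, hlt⟩)
      rw [if_pos (by simp [h]), if_pos (by omega)]

-- ---- B side ----

def pvState (pre : List String) : List (List String) × PySem.Set String × List String :=
  ((List.range 5).map (fun j => PySem.Set.ofList (pre.filter (fun c => pvRank c = j))),
   PySem.Set.ofList (pre.filter (fun c => pvRank c < 5)),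
   pre.filter (fun c => pvRank c = 5))

theorem ofList_append_singleton {α : Type} [DecidableEq α] (xs : List α) (c : α) :
    PySem.Set.ofList (xs ++ [c]) = PySem.Set.add (PySem.Set.ofList xs) c := by
  simp [PySem.Set.ofList_eq_foldl, List.foldl_append]

theorem modify_range_map {α : Type} (n k : Nat) (f : Nat → α) (g : α → α) (_hk : k < n) :
    ((List.range n).map f).modify k g
      = (List.range n).map (fun j => if j = k then g (f j) else f j) := by
  apply List.ext_getElem
  · simp [List.length_modify]
  · intro i h1 h2
    simp only [List.length_modify, List.length_map, List.length_range] at h1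
    rw [List.getElem_modify]
    simp only [List.getElem_map, List.getElem_range]
    by_cases h : k = i
    · rw [if_pos h, if_pos h.symm]
    · rw [if_neg h, if_neg (Ne.symm h)]

def pvStepB (st : List (List String) × PySem.Set String × List String) (col : String) :
    List (List String) × PySem.Set String × List String :=
  let (buckets, seen, others) := st
  let low := PySem.Str.lower col
  let rank := pvRankGo (["country", "state", "province", "region", "city"] : List String) 0 low
  if rank = (["country", "state", "province", "region", "city"] : List String).length
  then (buckets, seen, others ++ [col])
  else if PySem.Set.contains seen col = true then (buckets, seen, others)
  else (buckets.modify rank (fun b => b ++ [col]), PySem.Set.add seen col, others)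

theorem stepB_eq (pre : List String) (col : String) :
    pvStepB (pvState pre) col = pvState (pre ++ [col]) := by
  unfold pvStepB
  have hrank : pvRankGo (["country", "state", "province", "region", "city"] : List String) 0
      (PySem.Str.lower col) = pvRank col := rfl
  have h5 := pvRank_le col
  simp only [pvState, hrank, List.length_cons, List.length_nil, List.filter_append,
    List.filter_cons, List.filter_nil]
  by_cases h : pvRank col = 5
  · rw [if_pos (by omega)]
    refine congrArg₂ _ ?_ (congrArg₂ _ ?_ ?_)
    · refine (List.map_congr_left (fun j hj => ?_))
      rw [if_neg (by simp only [List.mem_range] at hj; simp only [decide_eq_true_eq]; omega),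
        List.append_nil]
    · rw [if_neg (by simp only [decide_eq_true_eq]; omega), List.append_nil]
    · rw [if_pos (by simp only [decide_eq_true_eq]; omega)]
  · rw [if_neg (by omega)]
    have hlt : pvRank col < 5 := by omega
    by_cases hin : col ∈ pre
    · rw [if_pos (by
        simp only [PySem.Set.contains_iff, PySem.Set.mem_ofList, List.mem_filter,
          decide_eq_true_eq]
        exact ⟨hin, hlt⟩)]
      refine congrArg₂ _ ?_ (congrArg₂ _ ?_ ?_)
      · refine (List.map_congr_left (fun j hj => ?_))
        by_cases hjr : pvRank col = j
        · rw [if_pos (by simp only [decide_eq_true_eq]; exact hjr), ofList_append_singleton,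
            PySem.Set.add, if_pos ((PySem.Set.contains_iff _ _).2 ((PySem.Set.mem_ofList _ _).2
              (List.mem_filter.2 ⟨hin, by simp only [decide_eq_true_eq]; exact hjr⟩)))]
        · rw [if_neg (by simp only [decide_eq_true_eq]; exact hjr), List.append_nil]
      · rw [if_pos (by simp only [decide_eq_true_eq]; exact hlt), ofList_append_singleton,
          PySem.Set.add, if_pos ((PySem.Set.contains_iff _ _).2 ((PySem.Set.mem_ofList _ _).2
            (List.mem_filter.2 ⟨hin, by simp only [decide_eq_true_eq]; exact hlt⟩)))]
      · rw [if_neg (by simp only [decide_eq_true_eq]; omega), List.append_nil]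
    · rw [if_neg (by
        simp only [PySem.Set.contains_iff, PySem.Set.mem_ofList, List.mem_filter,
          decide_eq_true_eq, not_and]
        intro hc
        exact absurd hc hin)]
      refine congrArg₂ _ ?_ (congrArg₂ _ ?_ ?_)
      · rw [modify_range_map 5 (pvRank col) _ _ hlt]
        refine (List.map_congr_left (fun j hj => ?_))
        by_cases hjr : j = pvRank col
        · rw [if_pos hjr, if_pos (by simp only [decide_eq_true_eq]; omega),
            ofList_append_singleton, PySem.Set.add,
            if_neg (by
              simp only [PySem.Set.contains_iff, PySem.Set.mem_ofList, List.mem_filter]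
              rintro ⟨hc, -⟩
              exact hin hc)]
        · rw [if_neg hjr, if_neg (by simp only [decide_eq_true_eq]; omega), List.append_nil]
      · rw [if_pos (by simp only [decide_eq_true_eq]; exact hlt), ofList_append_singleton,
          PySem.Set.add, if_neg (by
            simp only [PySem.Set.contains_iff, PySem.Set.mem_ofList, List.mem_filter]
            rintro ⟨hc, -⟩
            exact hin hc)]
      · rw [if_neg (by simp only [decide_eq_true_eq]; omega), List.append_nil]

theorem foldB_eq (l : List String) : ∀ (pre : List String),
    l.foldl pvStepB (pvState pre) = pvState (pre ++ l) := by
  induction l with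
  | nil => intro pre; simp
  | cons c rest ih =>
    intro pre
    rw [List.foldl_cons, stepB_eq pre c, ih (pre ++ [c]), List.append_assoc]
    rfl

theorem portB_eq (target : List String) :
    get_processing_order_optimized_alt target
      = pvOrdered target 5 ++ target.filter (fun c => pvRank c = 5) := by
  show ((target.foldl pvStepB (List.replicate 5 [], PySem.Set.empty, [])).1.foldl
      (fun r bucket => r ++ bucket) [])
    ++ (target.foldl pvStepB (List.replicate 5 [], PySem.Set.empty, [])).2.2 = _
  have hinit : ((List.replicate 5 [] : List (List String)), (PySem.Set.empty : PySem.Set String),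
      ([] : List String)) = pvState [] := by
    simp only [pvState, List.filter_nil]
    decide
  rw [hinit, foldB_eq target [], List.nil_append]
  congr 1

-- ===== VERDICT (by name: the statement is the Claim_ definition above) =====
theorem get_processing_order_optimized_spec : Claim_equal_get_processing_order_optimized := by
  intro target _
  show get_processing_order_optimized target = get_processing_order_optimized_alt target
  rw [portA_eq, portB_eq]
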